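-- pv_equiv track=rewrite | github.com/dawalama/remote-dev-control | src/remote_dev_ctrl/server/intent.py | fuzzy_match_action
-- ===== SOURCE A (Python) =====
-- from typing import Any, Optional
--
-- def fuzzy_match(query: str, candidates: list[str]) -> Optional[str]:
--     """Fuzzy match a query against a list of candidates."""
--     if not query or not candidates:
--         return None
--
--     q = query.lower().strip().replace(" ", "-")
--
--     # Exact match
--     for c in candidates:
--         if c.lower() == q:
--             return c
--
--     # Substring match
--     matches = [c for c in candidates if q in c.lower()]
--     if len(matches) == 1:
--         return matches[0]
--
--     # Partial word match — query words all appear somewhere in candidate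
--     q_words = query.lower().split()
--     if q_words:
--         word_matches = []
--         for c in candidates:
--             cl = c.lower()
--             if all(w in cl for w in q_words):
--                 word_matches.append(c)
--         if len(word_matches) == 1:
--             return word_matches[0]
--         if word_matches:
--             # Return shortest match (most specific)
--             return min(word_matches, key=len)
--
--     # If substring found multiple, return shortest
--     if matches:
--         return min(matches, key=len)
--
--     return None
--
-- def fuzzy_match_action(query: str, processes: list[dict]) -> Optional[str]:
--     """Fuzzy match an action query against available actions."""
--     ids = [p.get("id", "") for p in processes if p.get("id")]
--     names = [p.get("name", "") for p in processes if p.get("name")]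
--
--     # Try matching against IDs first (more specific)
--     result = fuzzy_match(query, ids)
--     if result:
--         return result
--
--     # Try matching against names, then map back to ID
--     name_match = fuzzy_match(query, names)
--     if name_match:
--         for p in processes:
--             if p.get("name") == name_match:
--                 return p.get("id", name_match)
--
--     return None
-- ===== SOURCE B (Python) =====
-- from typing import Optional
--
--
-- def _fuzzy_one_pass(query: str, candidates: list[str]) -> Optional[str]:
--     """Single pass over candidates: record first exact match, collect substring
--     matches and all-words matches, then apply the original precedence."""
--     if not query or not candidates:
--         return None
--     q = query.lower().strip().replace(" ", "-")
--     q_words = query.lower().split()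
--     exact = None
--     subs = []
--     words = []
--     for c in candidates:
--         cl = c.lower()
--         if exact is None and cl == q:
--             exact = c
--         if q in cl:
--             subs.append(c)
--         if q_words and all(w in cl for w in q_words):
--             words.append(c)
--     if exact is not None:
--         return exact
--     if len(subs) == 1:
--         return subs[0]
--     if words:
--         return min(words, key=len)
--     if subs:
--         return min(subs, key=len)
--     return None
--
--
-- def fuzzy_match_action(query: str, processes: list[dict]) -> Optional[str]:
--     ids = [v for p in processes if (v := p.get("id"))]
--     names = [v for p in processes if (v := p.get("name"))]
--
--     result = _fuzzy_one_pass(query, ids)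
--     if result:
--         return result
--
--     name_match = _fuzzy_one_pass(query, names)
--     if name_match:
--         match = next((p for p in processes if p.get("name") == name_match), None)
--         if match is not None:
--             return match.get("id", name_match)
--
--     return None
-- ===== Notes on version B (the rewrite author's own statement) =====
-- stated objective: alternative
-- what changed: The fuzzy-match helper's three separate candidate scans (early-return exact-match loop, substring comprehension, word-match loop) are replaced by one fold that collects the first exact match, the substring-match table and the word-match table in a single pass, with the original precedence then applied to the collected tables; the ids/names extraction becomes a single filter-map comprehension.
import Mathlib
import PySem

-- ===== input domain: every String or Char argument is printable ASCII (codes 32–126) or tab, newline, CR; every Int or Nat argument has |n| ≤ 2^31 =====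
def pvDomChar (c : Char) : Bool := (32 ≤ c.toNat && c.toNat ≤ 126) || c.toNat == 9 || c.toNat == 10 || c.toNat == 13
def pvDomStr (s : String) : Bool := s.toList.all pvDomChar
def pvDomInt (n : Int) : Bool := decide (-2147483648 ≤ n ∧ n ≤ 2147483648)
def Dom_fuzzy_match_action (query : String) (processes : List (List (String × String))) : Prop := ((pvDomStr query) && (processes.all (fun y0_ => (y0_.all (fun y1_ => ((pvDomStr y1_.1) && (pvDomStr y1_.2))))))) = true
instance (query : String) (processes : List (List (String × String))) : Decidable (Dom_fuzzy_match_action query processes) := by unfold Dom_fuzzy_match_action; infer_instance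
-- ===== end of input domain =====

-- B replaces the three separate candidate scans of the helper (exact loop, substring
-- comprehension, word-match loop) by ONE pass that collects all three tables, then applies
-- the original precedence to the tables; objective: alternative decomposition (same cost).

-- ===== PORT A =====
-- port of fuzzy_match (A): exact-match loop, then substring comprehension, then word-match loop
def pvA_fuzzy_match (query : String) (candidates : List String) : Option String :=
  if query = "" ∨ candidates = [] then none
  else
    let q := PySem.Str.replace (PySem.Str.strip (PySem.Str.lower query)) " " "-"
    match candidates.find? (fun c => PySem.Str.lower c == q) with
    | some c => some c
    | none =>
      let subm := candidates.filter (fun c => PySem.Str.isIn q (PySem.Str.lower c))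
      if subm.length = 1 then PySem.List.pyGet? subm 0
      else
        let q_words := PySem.Str.split₀ (PySem.Str.lower query)
        -- the fall-through tail of the function: "if matches: return min(matches, key=len); return None"
        let tail : Option String :=
          if subm ≠ [] then PySem.List.min? subm (fun s => PySem.Str.len s) else none
        if q_words ≠ [] then
          let word_matches := candidates.filter
            (fun c => q_words.all (fun w => PySem.Str.isIn w (PySem.Str.lower c)))
          if word_matches.length = 1 then PySem.List.pyGet? word_matches 0
          else if word_matches ≠ [] then PySem.List.min? word_matches (fun s => PySem.Str.len s)
          else tail
        else tail

def fuzzy_match_action (query : String) (processes : List (List (String × String))) : Option String :=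
  let ids := (processes.filter (fun p => ((PySem.Dict.mk p).get? "id").getD "" != "")).map
      (fun p => ((PySem.Dict.mk p).get? "id").getD "")
  let names := (processes.filter (fun p => ((PySem.Dict.mk p).get? "name").getD "" != "")).map
      (fun p => ((PySem.Dict.mk p).get? "name").getD "")
  -- "if name_match: for p in processes: if p.get('name') == name_match: return p.get('id', name_match); return None"
  let byName : Option String :=
    match pvA_fuzzy_match query names with
    | some nm =>
      if nm != "" then
        match processes.find? (fun p => (PySem.Dict.mk p).get? "name" == some nm) with
        | some p => some (((PySem.Dict.mk p).get? "id").getD nm)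
        | none => none
      else none
    | none => none
  match pvA_fuzzy_match query ids with
  | some r => if r != "" then some r else byName
  | none => byName

-- ===== PORT B =====
-- the body of B's single loop over candidates
def pvStep (q : String) (qw : List String) (st : Option String × List String × List String)
    (c : String) : Option String × List String × List String :=
  let cl := PySem.Str.lower c
  ((match st.1 with
    | some e => some e
    | none => if PySem.Str.lower c == q then some c else none),
   (if PySem.Str.isIn q cl then st.2.1 ++ [c] else st.2.1),
   (if (qw != []) && qw.all (fun w => PySem.Str.isIn w cl) then st.2.2 ++ [c] else st.2.2))

-- port of _fuzzy_one_pass (B): one fold collecting (first exact, substring matches, word matches)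
def pvB_one_pass (query : String) (candidates : List String) : Option String :=
  if query = "" ∨ candidates = [] then none
  else
    let q := PySem.Str.replace (PySem.Str.strip (PySem.Str.lower query)) " " "-"
    let q_words := PySem.Str.split₀ (PySem.Str.lower query)
    let st := candidates.foldl (pvStep q q_words) (none, [], [])
    match st.1 with
    | some e => some e
    | none =>
      if st.2.1.length = 1 then st.2.1.head?
      else if st.2.2 ≠ [] then PySem.List.min? st.2.2 (fun s => PySem.Str.len s)
      else if st.2.1 ≠ [] then PySem.List.min? st.2.1 (fun s => PySem.Str.len s)
      else none

def fuzzy_match_action_alt (query : String) (processes : List (List (String × String))) : Option String :=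
  let ids := processes.filterMap (fun p =>
    match (PySem.Dict.mk p).get? "id" with
    | some v => if v != "" then some v else none
    | none => none)
  let names := processes.filterMap (fun p =>
    match (PySem.Dict.mk p).get? "name" with
    | some v => if v != "" then some v else none
    | none => none)
  let byName : Option String :=
    match pvB_one_pass query names with
    | some nm =>
      if nm != "" then
        match processes.find? (fun p => (PySem.Dict.mk p).get? "name" == some nm) with
        | some p => some (((PySem.Dict.mk p).get? "id").getD nm)
        | none => none
      else none
    | none => none
  match pvB_one_pass query ids with
  | some r => if r != "" then some r else byName
  | none => byName

-- ===== PRECONDITION & SPEC =====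
def Spec_fuzzy_match_action (query : String) (processes : List (List (String × String))) (out : Option String) : Prop := out = fuzzy_match_action_alt query processes
instance (query : String) (processes : List (List (String × String))) (out : Option String) : Decidable (Spec_fuzzy_match_action query processes out) := by unfold Spec_fuzzy_match_action; infer_instance

-- ===== CLAIM (what is proved, stated in full; the proofs are below) =====
def Claim_equal_fuzzy_match_action : Prop := ∀ (query : String) (processes : List (List (String × String))), Dom_fuzzy_match_action query processes → Spec_fuzzy_match_action query processes (fuzzy_match_action query processes)

-- ===== LEMMAS AND PROOFS =====

-- the single pass collects exactly (first exact match, substring-match table, word-match table)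
lemma pvStep_foldl (q : String) (qw : List String) :
    ∀ (cs : List String) (ex0 : Option String) (s0 w0 : List String),
      cs.foldl (pvStep q qw) (ex0, s0, w0)
        = ((match ex0 with
            | some e => some e
            | none => cs.find? (fun c => PySem.Str.lower c == q)),
           s0 ++ cs.filter (fun c => PySem.Str.isIn q (PySem.Str.lower c)),
           w0 ++ cs.filter (fun c => (qw != []) && qw.all (fun w => PySem.Str.isIn w (PySem.Str.lower c)))) := by
  intro cs
  induction cs with
  | nil => intro ex0 s0 w0; cases ex0 <;> simp
  | cons c cs ih =>
    intro ex0 s0 w0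
    simp only [List.foldl_cons, pvStep, List.find?_cons, List.filter_cons]
    rw [ih]
    refine Prod.ext ?_ (Prod.ext ?_ ?_)
    · cases ex0 with
      | some e => rfl
      | none =>
        simp only []
        cases (PySem.Str.lower c == q) <;> simp

    · simp only []; split <;> simp
    · simp only []; split <;> simp

lemma pv_min?_singleton {κ : Type} [LinearOrder κ] (x : String) (key : String → κ) :
    PySem.List.min? [x] key = some x := by
  simp [PySem.List.min?]

lemma pv_helper_eq (query : String) (candidates : List String) :
    pvA_fuzzy_match query candidates = pvB_one_pass query candidates := by
  by_cases hg : query = "" ∨ candidates = []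
  · simp only [pvA_fuzzy_match, pvB_one_pass, if_pos hg]
  · simp only [pvA_fuzzy_match, pvB_one_pass, if_neg hg, pvStep_foldl]
    generalize PySem.Str.replace (PySem.Str.strip (PySem.Str.lower query)) " " "-" = q
    generalize hqw : PySem.Str.split₀ (PySem.Str.lower query) = qw
    cases hfind : candidates.find? (fun c => PySem.Str.lower c == q) with
    | some c => simp
    | none =>
      simp only [List.nil_append]
      generalize candidates.filter (fun c => PySem.Str.isIn q (PySem.Str.lower c)) = ms
      by_cases hqwn : qw = []
      · have hwt : candidates.filter
            (fun c => (qw != []) && qw.all (fun w => PySem.Str.isIn w (PySem.Str.lower c))) = [] := by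
          simp [hqwn]
        rw [hwt]
        by_cases h1 : ms.length = 1
        · obtain ⟨x, hx⟩ := List.length_eq_one_iff.mp h1
          subst hx
          simp [pysem]
        · rw [if_neg h1, if_neg (by simp [hqwn] : ¬ qw ≠ []), if_neg h1]
          simp
      · have hwt : candidates.filter
            (fun c => (qw != []) && qw.all (fun w => PySem.Str.isIn w (PySem.Str.lower c)))
            = candidates.filter (fun c => qw.all (fun w => PySem.Str.isIn w (PySem.Str.lower c))) := by
          apply List.filter_congr
          intro c _
          simp [hqwn]
        rw [hwt]
        generalize candidates.filter (fun c => qw.all (fun w => PySem.Str.isIn w (PySem.Str.lower c))) = wm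
        by_cases h1 : ms.length = 1
        · obtain ⟨x, hx⟩ := List.length_eq_one_iff.mp h1
          subst hx
          simp [pysem]
        · rw [if_neg h1, if_pos hqwn, if_neg h1]
          by_cases hw1 : wm.length = 1
          · obtain ⟨x, hx⟩ := List.length_eq_one_iff.mp hw1
            subst hx
            simp only [pysem]
            rw [if_pos (by simp : ([x] : List String).length = 1),
                if_pos (by simp : ([x] : List String) ≠ [])]
            simp [pv_min?_singleton]
          · by_cases hwn : wm = []
            · simp [hwn, hw1]
            · simp [hwn, hw1]

-- the two list-comprehension forms for ids/names agree
lemma pv_lists_eq (k : String) (processes : List (List (String × String))) :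
    (processes.filter (fun p => ((PySem.Dict.mk p).get? k).getD "" != "")).map
        (fun p => ((PySem.Dict.mk p).get? k).getD "")
      = processes.filterMap (fun p =>
          match (PySem.Dict.mk p).get? k with
          | some v => if v != "" then some v else none
          | none => none) := by
  induction processes with
  | nil => rfl
  | cons p ps ih =>
    simp only [List.filter_cons, List.filterMap_cons]
    cases hg : (PySem.Dict.mk p).get? k with
    | none => simpa [hg] using ih
    | some v =>
      by_cases hv : v = ""
      · simpa [hg, hv] using ih
      · simpa [hg, hv] using ih

-- ===== VERDICT (by name: the statement is the Claim_ definition above) =====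
theorem fuzzy_match_action_spec : Claim_equal_fuzzy_match_action := by
  intro query processes _
  unfold Spec_fuzzy_match_action
  unfold fuzzy_match_action fuzzy_match_action_alt
  simp only [pv_helper_eq, pv_lists_eq]
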